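-- pv_equiv track=rewrite | github.com/shinimashzi/bundlefly | bundlefly_topology/utils.py | get_X_q
-- ===== SOURCE A (Python) =====
-- def get_X_q(q, xi):
--     Xq_temp = []
--     if q%4 == 0:
--         for i in range(0, q-1, 2):
--             Xq_temp.append(xi**i%q)
--     elif q%4 == 1:
--         for i in range(0, q-2, 2):
--             Xq_temp.append(xi**i%q)
--     else:
--         wq = int((q+1)//4)
--         for i in range(0, 2*wq-1, 2):
--             Xq_temp.append(xi**i%q)
--         for i in range(2*wq-1, 4*wq-2, 2):
--             Xq_temp.append(xi**i%q)
--         Xq__temp = []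
--         for i in range(1, 2*wq, 2):
--             Xq__temp.append(xi**i%q)
--         for i in range(2*wq, 4*wq-1, 2):
--             Xq__temp.append(xi**i%q)
--
--         Xq, Xq_ = [], []
--         for x in range(1,q):
--             if x in Xq_temp:
--                 Xq.append(x)
--             if x in Xq__temp:
--                 Xq_.append(x)
--
--     if q%4==0 or q%4==1:
--         Xq, Xq_ = [], []
--         for x in range(1, q):
--             if x in Xq_temp:
--                 Xq.append(x)
--             else:
--                 Xq_.append(x)
--     else:
--         pass
--     return Xq, Xq_
-- ===== SOURCE B (Python) =====
-- def get_X_q(q, xi):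
--     r = q % 4
--     if r == 0 or r == 1:
--         # seen = residues of xi at even exponents, built by incremental modular
--         # squaring-step multiplication instead of big-integer xi**i.
--         stop = q - 1 - r
--         seen = set()
--         if stop > 0:
--             p, sq = 1 % q, xi * xi % q
--             for _ in range((stop + 1) // 2):
--                 seen.add(p)
--                 p = p * sq % q
--         Xq = [x for x in range(1, q) if x in seen]
--         Xq_ = [x for x in range(1, q) if x not in seen]
--         return Xq, Xq_
--     else:
--         wq = (q + 1) // 4
--         pset = set()
--         if wq > 0:
--             p, sq = 1 % q, xi * xi % q
--             for k in range(2 * wq):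
--                 pset.add(p)
--                 p = p * (xi if k == wq - 1 else sq) % q
--         oset = {xi * v % q for v in pset}
--         Xq = [x for x in range(1, q) if x in pset]
--         Xq_ = [x for x in range(1, q) if x in oset]
--         return Xq, Xq_
-- ===== Notes on version B (the rewrite author's own statement) =====
-- stated objective: faster
-- what changed: B builds the set of xi-power residues once by incremental modular multiplication (constant-size numbers) and classifies 1..q-1 with O(1) set-membership tests, instead of A's huge-integer xi**i exponentiations followed by a linear list scan for every x in 1..q-1.
import Mathlib
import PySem

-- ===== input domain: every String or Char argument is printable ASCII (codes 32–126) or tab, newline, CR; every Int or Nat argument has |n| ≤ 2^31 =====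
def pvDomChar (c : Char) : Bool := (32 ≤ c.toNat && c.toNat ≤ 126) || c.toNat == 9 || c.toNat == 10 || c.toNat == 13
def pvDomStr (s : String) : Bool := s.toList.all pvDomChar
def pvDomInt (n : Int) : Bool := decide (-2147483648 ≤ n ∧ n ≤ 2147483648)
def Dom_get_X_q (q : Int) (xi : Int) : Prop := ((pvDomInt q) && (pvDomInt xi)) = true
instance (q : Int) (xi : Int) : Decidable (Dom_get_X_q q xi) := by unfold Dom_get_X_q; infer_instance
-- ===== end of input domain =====

-- B replaces A's quadratic membership scans and huge-integer xi**i by a set of residues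
-- built with incremental modular multiplication; measurably faster (asymptotic).

-- ===== PORT A =====
def get_X_q (q : Int) (xi : Int) : List Int × List Int :=
  if PySem.Int.mod q 4 = 0 then
    let Xq_temp := (PySem.List.pyRange 0 (q-1) 2).foldl
      (fun acc i => acc ++ [PySem.Int.mod (xi ^ i.toNat) q]) []
    ((PySem.List.pyRange 1 q 1).filter (fun x => Xq_temp.contains x),
     (PySem.List.pyRange 1 q 1).filter (fun x => !(Xq_temp.contains x)))
  else if PySem.Int.mod q 4 = 1 then
    let Xq_temp := (PySem.List.pyRange 0 (q-2) 2).foldl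
      (fun acc i => acc ++ [PySem.Int.mod (xi ^ i.toNat) q]) []
    ((PySem.List.pyRange 1 q 1).filter (fun x => Xq_temp.contains x),
     (PySem.List.pyRange 1 q 1).filter (fun x => !(Xq_temp.contains x)))
  else
    let wq := PySem.Int.floordiv (q+1) 4
    let Xq_temp := (PySem.List.pyRange (2*wq-1) (4*wq-2) 2).foldl
      (fun acc i => acc ++ [PySem.Int.mod (xi ^ i.toNat) q])
      ((PySem.List.pyRange 0 (2*wq-1) 2).foldl
        (fun acc i => acc ++ [PySem.Int.mod (xi ^ i.toNat) q]) [])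
    let Xq__temp := (PySem.List.pyRange (2*wq) (4*wq-1) 2).foldl
      (fun acc i => acc ++ [PySem.Int.mod (xi ^ i.toNat) q])
      ((PySem.List.pyRange 1 (2*wq) 2).foldl
        (fun acc i => acc ++ [PySem.Int.mod (xi ^ i.toNat) q]) [])
    ((PySem.List.pyRange 1 q 1).filter (fun x => Xq_temp.contains x),
     (PySem.List.pyRange 1 q 1).filter (fun x => Xq__temp.contains x))

-- ===== PORT B =====
-- loop body of B's first branch: add the current power, multiply by xi*xi % q
def pvStep1 (q xi : Int) (st : PySem.Set Int × Int) (_ : Int) : PySem.Set Int × Int :=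
  (st.1.add st.2, PySem.Int.mod (st.2 * PySem.Int.mod (xi * xi) q) q)

-- loop body of B's else branch: at k = wq-1 the extra factor is xi, else xi*xi % q
def pvStep2 (q xi wq : Int) (st : PySem.Set Int × Int) (k : Int) : PySem.Set Int × Int :=
  (st.1.add st.2,
   PySem.Int.mod (st.2 * (if k = wq - 1 then xi else PySem.Int.mod (xi * xi) q)) q)

def get_X_q_alt (q : Int) (xi : Int) : List Int × List Int :=
  let r := PySem.Int.mod q 4
  if r = 0 ∨ r = 1 then
    let stop := q - 1 - r
    let seen : PySem.Set Int :=
      if 0 < stop then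
        ((PySem.List.pyRange 0 (PySem.Int.floordiv (stop + 1) 2) 1).foldl
          (pvStep1 q xi) (PySem.Set.empty, PySem.Int.mod 1 q)).1
      else PySem.Set.empty
    ((PySem.List.pyRange 1 q 1).filter (fun x => PySem.Set.contains seen x),
     (PySem.List.pyRange 1 q 1).filter (fun x => !(PySem.Set.contains seen x)))
  else
    let wq := PySem.Int.floordiv (q+1) 4
    let pset : PySem.Set Int :=
      if 0 < wq then
        ((PySem.List.pyRange 0 (2*wq) 1).foldl
          (pvStep2 q xi wq) (PySem.Set.empty, PySem.Int.mod 1 q)).1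
      else PySem.Set.empty
    let oset : PySem.Set Int := PySem.Set.ofList (pset.map (fun v => PySem.Int.mod (xi * v) q))
    ((PySem.List.pyRange 1 q 1).filter (fun x => PySem.Set.contains pset x),
     (PySem.List.pyRange 1 q 1).filter (fun x => PySem.Set.contains oset x))

-- ===== PRECONDITION & SPEC =====
def Spec_get_X_q (q : Int) (xi : Int) (out : List Int × List Int) : Prop := out = get_X_q_alt q xi
instance (q : Int) (xi : Int) (out : List Int × List Int) : Decidable (Spec_get_X_q q xi out) := by unfold Spec_get_X_q; infer_instance

-- ===== CLAIM (what is proved, stated in full; the proofs are below) =====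
def Claim_equal_get_X_q : Prop := ∀ (q : Int) (xi : Int), Dom_get_X_q q xi → Spec_get_X_q q xi (get_X_q q xi)

-- ===== LEMMAS AND PROOFS =====

-- modular-arithmetic steps (Python % = emod for a positive modulus)
theorem pv_mul_pow (q xi : Int) (hq : 0 < q) (e : Nat) :
    PySem.Int.mod (PySem.Int.mod (xi ^ e) q * PySem.Int.mod (xi * xi) q) q
      = PySem.Int.mod (xi ^ (e + 2)) q := by
  simp only [PySem.Int.mod_eq_emod_of_pos hq]
  rw [← Int.mul_emod]
  congr 1
  rw [pow_add]; ring

theorem pv_mul_xi_right (q xi : Int) (hq : 0 < q) (e : Nat) :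
    PySem.Int.mod (PySem.Int.mod (xi ^ e) q * xi) q = PySem.Int.mod (xi ^ (e + 1)) q := by
  simp only [PySem.Int.mod_eq_emod_of_pos hq]
  conv_rhs => rw [pow_succ, Int.mul_emod]
  rw [Int.mul_emod (xi ^ e % q) xi, Int.emod_emod_of_dvd _ dvd_rfl]

theorem pv_xi_mul_left (q xi : Int) (hq : 0 < q) (e : Nat) :
    PySem.Int.mod (xi * PySem.Int.mod (xi ^ e) q) q = PySem.Int.mod (xi ^ (e + 1)) q := by
  rw [show xi * PySem.Int.mod (xi ^ e) q = PySem.Int.mod (xi ^ e) q * xi from mul_comm _ _]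
  exact pv_mul_xi_right q xi hq e

-- invariant of B's pure-squaring loop: the running value and the collected set
theorem pv_fold1_snd (q xi : Int) (hq : 0 < q) (l : List Int) :
    ∀ (e : Nat) (s : PySem.Set Int),
      (l.foldl (pvStep1 q xi) (s, PySem.Int.mod (xi ^ e) q)).2
        = PySem.Int.mod (xi ^ (e + 2 * l.length)) q := by
  induction l with
  | nil => intro e s; simp
  | cons a t ih =>
      intro e s
      simp only [List.foldl_cons, List.length_cons, pvStep1]
      rw [pv_mul_pow q xi hq e, ih (e + 2) (s.add _), show e + 2 + 2 * t.length = e + 2 * (t.length + 1) from by omega]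

theorem pv_fold1_mem (q xi : Int) (hq : 0 < q) (l : List Int) :
    ∀ (e : Nat) (s : PySem.Set Int) (x : Int),
      (x ∈ (l.foldl (pvStep1 q xi) (s, PySem.Int.mod (xi ^ e) q)).1
        ↔ x ∈ s ∨ ∃ k < l.length, x = PySem.Int.mod (xi ^ (e + 2 * k)) q) := by
  induction l with
  | nil => intro e s x; simp
  | cons a t ih =>
      intro e s x
      simp only [List.foldl_cons, List.length_cons, pvStep1]
      rw [pv_mul_pow q xi hq e, ih (e + 2) (s.add _) x, PySem.Set.mem_add]
      constructor
      · rintro ((hs | hx) | ⟨k, hk, hx⟩)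
        · exact Or.inl hs
        · exact Or.inr ⟨0, by omega, by simpa using hx⟩
        · exact Or.inr ⟨k + 1, by omega, by rw [hx, show e + 2 + 2 * k = e + 2 * (k + 1) from by omega]⟩
      · rintro (hs | ⟨k, hk, hx⟩)
        · exact Or.inl (Or.inl hs)
        · match k with
          | 0 => exact Or.inl (Or.inr (by simpa using hx))
          | k + 1 => exact Or.inr ⟨k, by omega, by rw [hx, show e + 2 + 2 * k = e + 2 * (k + 1) from by omega]⟩

-- off the special index, B's else-branch loop is the pure-squaring loop
theorem pv_step2_eq (q xi wq : Int) (l : List Int) (h : ∀ k ∈ l, k ≠ wq - 1)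
    (st : PySem.Set Int × Int) :
    l.foldl (pvStep2 q xi wq) st = l.foldl (pvStep1 q xi) st := by
  refine PySem.List.foldl_congr_mem l _ _ st ?_
  intro acc x hx
  simp only [pvStep2, pvStep1, if_neg (h x hx)]

-- branch q%4 ∈ {0,1}: A's even-power list and B's set contain the same residues
theorem pv_mem01 (q xi stop : Int) (hq : stop < q) (x : Int) :
    ((PySem.List.pyRange 0 stop 2).foldl
        (fun acc i => acc ++ [PySem.Int.mod (xi ^ i.toNat) q]) []).contains x
      = PySem.Set.contains
          (if 0 < stop then
            ((PySem.List.pyRange 0 (PySem.Int.floordiv (stop + 1) 2) 1).foldl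
              (pvStep1 q xi) (PySem.Set.empty, PySem.Int.mod 1 q)).1
           else PySem.Set.empty) x := by
  by_cases h : 0 < stop
  · have hq0 : 0 < q := lt_trans h hq
    rw [if_pos h, Bool.eq_iff_iff, List.contains_iff_mem, PySem.Set.contains_iff,
      PySem.List.foldl_append_singleton_eq_map, List.nil_append,
      PySem.Int.floordiv_eq_ediv_of_pos (show (0:Int) < 2 by norm_num),
      show PySem.Int.mod 1 q = PySem.Int.mod (xi ^ 0) q from by rw [pow_zero],
      pv_fold1_mem q xi hq0 _ 0 PySem.Set.empty x, List.mem_map,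
      PySem.List.length_pyRange_one]
    constructor
    · rintro ⟨i, hi, rfl⟩
      rw [PySem.List.mem_pyRange_iff_of_pos (show (0:Int) < 2 by norm_num)] at hi
      obtain ⟨h1, h2, h3⟩ := hi
      exact Or.inr ⟨i.toNat / 2, by omega, by rw [show 0 + 2 * (i.toNat / 2) = i.toNat from by omega]⟩
    · rintro (hx | ⟨k, hk, rfl⟩)
      · cases hx
      · refine ⟨2 * (k : Int), ?_, ?_⟩
        · rw [PySem.List.mem_pyRange_iff_of_pos (show (0:Int) < 2 by norm_num)]
          refine ⟨by omega, by omega, ⟨(k : Int), by ring⟩⟩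
        · rw [show ((2 * (k : Int)).toNat) = 0 + 2 * k from by omega]
  · rw [if_neg h,
      PySem.List.pyRange_of_pos 0 stop (show (0:Int) < 2 by norm_num), if_neg (by omega)]
    simp [PySem.Set.empty]

-- else branch (q%4 ∈ {2,3}), wq > 0: membership in B's set of visited powers
theorem pv_pset_mem (q xi wq : Int) (hq : 0 < q) (hw : 0 < wq) (x : Int) :
    (x ∈ ((PySem.List.pyRange 0 (2*wq) 1).foldl
            (pvStep2 q xi wq) (PySem.Set.empty, PySem.Int.mod 1 q)).1
      ↔ (∃ k < wq.toNat, x = PySem.Int.mod (xi ^ (2 * k)) q)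
        ∨ (∃ j < wq.toNat, x = PySem.Int.mod (xi ^ (2 * wq.toNat - 1 + 2 * j)) q)) := by
  have h3 : PySem.List.pyRange (wq-1) wq = [wq-1] := by
    have h := PySem.List.pyRange_one_singleton (wq-1)
    rwa [sub_add_cancel] at h
  rw [PySem.List.pyRange_one_append 0 wq (2*wq) (by omega) (by omega),
    PySem.List.pyRange_one_append 0 (wq-1) wq (by omega) (by omega), h3,
    List.foldl_append, List.foldl_append,
    pv_step2_eq q xi wq (PySem.List.pyRange 0 (wq-1) 1)
      (fun k hk => by rw [PySem.List.mem_pyRange_one] at hk; omega) _,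
    pv_step2_eq q xi wq (PySem.List.pyRange wq (2*wq) 1)
      (fun k hk => by rw [PySem.List.mem_pyRange_one] at hk; omega) _,
    show PySem.Int.mod 1 q = PySem.Int.mod (xi ^ 0) q from by rw [pow_zero]]
  simp only [List.foldl_cons, List.foldl_nil, pvStep2]
  simp only [if_true]
  rw [pv_fold1_snd q xi hq _ 0 _, pv_mul_xi_right q xi hq _,
    pv_fold1_mem q xi hq _ _ _ x, PySem.Set.mem_add,
    pv_fold1_mem q xi hq _ 0 PySem.Set.empty x]
  simp only [PySem.List.length_pyRange_one]
  have me : ∀ (a b : Nat), a = b → PySem.Int.mod (xi ^ a) q = PySem.Int.mod (xi ^ b) q :=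
    fun a b h => by rw [h]
  constructor
  · rintro (((hx | ⟨k, hk, rfl⟩) | rfl) | ⟨k, hk, rfl⟩)
    · cases hx
    · exact Or.inl ⟨k, by omega, me _ _ (by omega)⟩
    · exact Or.inl ⟨((wq - 1) - 0).toNat, by omega, me _ _ (by omega)⟩
    · exact Or.inr ⟨k, by omega, me _ _ (by omega)⟩
  · rintro (⟨k, hk, rfl⟩ | ⟨k, hk, rfl⟩)
    · by_cases hlast : k = ((wq - 1) - 0).toNat
      · exact Or.inl (Or.inr (by subst hlast; exact me _ _ (by omega)))
      · exact Or.inl (Or.inl (Or.inr ⟨k, by omega, me _ _ (by omega)⟩))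
    · exact Or.inr ⟨k, by omega, me _ _ (by omega)⟩

-- else branch: membership in A's two appendance lists
theorem pv_XqTemp_mem (q xi wq : Int) (hw : 0 < wq) (x : Int) :
    (x ∈ (PySem.List.pyRange (2*wq-1) (4*wq-2) 2).foldl
          (fun acc i => acc ++ [PySem.Int.mod (xi ^ i.toNat) q])
          ((PySem.List.pyRange 0 (2*wq-1) 2).foldl
            (fun acc i => acc ++ [PySem.Int.mod (xi ^ i.toNat) q]) [])
      ↔ (∃ k < wq.toNat, x = PySem.Int.mod (xi ^ (2 * k)) q)
        ∨ (∃ j < wq.toNat, x = PySem.Int.mod (xi ^ (2 * wq.toNat - 1 + 2 * j)) q)) := by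
  rw [PySem.List.foldl_append_singleton_eq_map, PySem.List.foldl_append_singleton_eq_map,
    List.nil_append, List.mem_append, List.mem_map, List.mem_map]
  have me : ∀ (a b : Nat), a = b → PySem.Int.mod (xi ^ a) q = PySem.Int.mod (xi ^ b) q :=
    fun a b h => by rw [h]
  constructor
  · rintro (⟨i, hi, rfl⟩ | ⟨i, hi, rfl⟩)
    · rw [PySem.List.mem_pyRange_iff_of_pos (show (0:Int) < 2 by norm_num)] at hi
      obtain ⟨h1, h2, h3⟩ := hi
      exact Or.inl ⟨i.toNat / 2, by omega, (me _ _ (by omega)).symm⟩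
    · rw [PySem.List.mem_pyRange_iff_of_pos (show (0:Int) < 2 by norm_num)] at hi
      obtain ⟨h1, h2, h3⟩ := hi
      exact Or.inr ⟨(i.toNat - (2 * wq.toNat - 1)) / 2, by omega, (me _ _ (by omega)).symm⟩
  · rintro (⟨k, hk, rfl⟩ | ⟨j, hj, rfl⟩)
    · refine Or.inl ⟨2 * (k : Int), ?_, me _ _ (by omega)⟩
      rw [PySem.List.mem_pyRange_iff_of_pos (show (0:Int) < 2 by norm_num)]
      exact ⟨by omega, by omega, by omega⟩
    · refine Or.inr ⟨2 * wq - 1 + 2 * (j : Int), ?_, me _ _ (by omega)⟩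
      rw [PySem.List.mem_pyRange_iff_of_pos (show (0:Int) < 2 by norm_num)]
      exact ⟨by omega, by omega, by omega⟩

theorem pv_XqTemp'_mem (q xi wq : Int) (hw : 0 < wq) (x : Int) :
    (x ∈ (PySem.List.pyRange (2*wq) (4*wq-1) 2).foldl
          (fun acc i => acc ++ [PySem.Int.mod (xi ^ i.toNat) q])
          ((PySem.List.pyRange 1 (2*wq) 2).foldl
            (fun acc i => acc ++ [PySem.Int.mod (xi ^ i.toNat) q]) [])
      ↔ (∃ k < wq.toNat, x = PySem.Int.mod (xi ^ (2 * k + 1)) q)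
        ∨ (∃ j < wq.toNat, x = PySem.Int.mod (xi ^ (2 * wq.toNat + 2 * j)) q)) := by
  rw [PySem.List.foldl_append_singleton_eq_map, PySem.List.foldl_append_singleton_eq_map,
    List.nil_append, List.mem_append, List.mem_map, List.mem_map]
  have me : ∀ (a b : Nat), a = b → PySem.Int.mod (xi ^ a) q = PySem.Int.mod (xi ^ b) q :=
    fun a b h => by rw [h]
  constructor
  · rintro (⟨i, hi, rfl⟩ | ⟨i, hi, rfl⟩)
    · rw [PySem.List.mem_pyRange_iff_of_pos (show (0:Int) < 2 by norm_num)] at hi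
      obtain ⟨h1, h2, h3⟩ := hi
      exact Or.inl ⟨i.toNat / 2, by omega, (me _ _ (by omega)).symm⟩
    · rw [PySem.List.mem_pyRange_iff_of_pos (show (0:Int) < 2 by norm_num)] at hi
      obtain ⟨h1, h2, h3⟩ := hi
      exact Or.inr ⟨(i.toNat - 2 * wq.toNat) / 2, by omega, (me _ _ (by omega)).symm⟩
  · rintro (⟨k, hk, rfl⟩ | ⟨j, hj, rfl⟩)
    · refine Or.inl ⟨1 + 2 * (k : Int), ?_, me _ _ (by omega)⟩
      rw [PySem.List.mem_pyRange_iff_of_pos (show (0:Int) < 2 by norm_num)]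
      exact ⟨by omega, by omega, by omega⟩
    · refine Or.inr ⟨2 * wq + 2 * (j : Int), ?_, me _ _ (by omega)⟩
      rw [PySem.List.mem_pyRange_iff_of_pos (show (0:Int) < 2 by norm_num)]
      exact ⟨by omega, by omega, by omega⟩

-- the two filter predicates agree pointwise, hence the two result pairs coincide
theorem pv_main (q xi : Int) : get_X_q q xi = get_X_q_alt q xi := by
  simp only [get_X_q, get_X_q_alt]
  by_cases h0 : PySem.Int.mod q 4 = 0
  · rw [if_pos h0, if_pos (Or.inl h0 : PySem.Int.mod q 4 = 0 ∨ PySem.Int.mod q 4 = 1), h0,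
      show q - 1 - (0:Int) = q - 1 from by ring]
    have hc := pv_mem01 q xi (q - 1) (by omega)
    exact congrArg₂ Prod.mk (List.filter_congr fun x _ => hc x)
      (List.filter_congr fun x _ => by rw [hc x])
  · by_cases h1 : PySem.Int.mod q 4 = 1
    · rw [if_neg h0, if_pos h1, if_pos (Or.inr h1 : PySem.Int.mod q 4 = 0 ∨ PySem.Int.mod q 4 = 1),
        h1, show q - 1 - (1:Int) = q - 2 from by ring]
      have hc := pv_mem01 q xi (q - 2) (by omega)
      exact congrArg₂ Prod.mk (List.filter_congr fun x _ => hc x)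
        (List.filter_congr fun x _ => by rw [hc x])
    · rw [if_neg h0, if_neg h1,
        if_neg (by tauto : ¬(PySem.Int.mod q 4 = 0 ∨ PySem.Int.mod q 4 = 1))]
      by_cases hw : 0 < PySem.Int.floordiv (q+1) 4
      · have hq : 0 < q := by
          have h4 := (PySem.Int.le_floordiv_iff_mul_le
            (show (0:Int) < 4 by norm_num) (a := q+1) (q := 1)).mp (by omega)
          omega
        rw [if_pos hw]
        have hA := pv_XqTemp_mem q xi (PySem.Int.floordiv (q+1) 4) hw
        have hB := pv_pset_mem q xi (PySem.Int.floordiv (q+1) 4) hq hw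
        have hA' := pv_XqTemp'_mem q xi (PySem.Int.floordiv (q+1) 4) hw
        have me : ∀ (a b : Nat), a = b → PySem.Int.mod (xi ^ a) q = PySem.Int.mod (xi ^ b) q :=
          fun a b h => by rw [h]
        refine congrArg₂ Prod.mk (List.filter_congr fun x _ => ?_)
          (List.filter_congr fun x _ => ?_)
        · rw [Bool.eq_iff_iff, List.contains_iff_mem, PySem.Set.contains_iff]
          exact (hA x).trans (hB x).symm
        · rw [Bool.eq_iff_iff, List.contains_iff_mem, PySem.Set.contains_iff,
            PySem.Set.mem_ofList, List.mem_map, hA' x]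
          constructor
          · rintro (⟨k, hk, rfl⟩ | ⟨j, hj, rfl⟩)
            · exact ⟨PySem.Int.mod (xi ^ (2*k)) q, (hB _).mpr (Or.inl ⟨k, hk, rfl⟩),
                pv_xi_mul_left q xi hq (2*k)⟩
            · exact ⟨PySem.Int.mod (xi ^ (2*(PySem.Int.floordiv (q+1) 4).toNat - 1 + 2*j)) q,
                (hB _).mpr (Or.inr ⟨j, hj, rfl⟩),
                by rw [pv_xi_mul_left q xi hq]; exact me _ _ (by omega)⟩
          · rintro ⟨v, hv, rfl⟩
            rcases (hB v).mp hv with ⟨k, hk, rfl⟩ | ⟨j, hj, rfl⟩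
            · exact Or.inl ⟨k, hk, pv_xi_mul_left q xi hq (2*k)⟩
            · exact Or.inr ⟨j, hj,
                by rw [pv_xi_mul_left q xi hq]; exact me _ _ (by omega)⟩
      · rw [if_neg hw]
        have e1 : PySem.List.pyRange 0 (2 * PySem.Int.floordiv (q+1) 4 - 1) 2 = [] := by
          rw [PySem.List.pyRange_of_pos _ _ (show (0:Int) < 2 by norm_num), if_neg (by omega)]
          simp
        have e2 : PySem.List.pyRange (2 * PySem.Int.floordiv (q+1) 4 - 1)
            (4 * PySem.Int.floordiv (q+1) 4 - 2) 2 = [] := by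
          rw [PySem.List.pyRange_of_pos _ _ (show (0:Int) < 2 by norm_num), if_neg (by omega)]
          simp
        have e3 : PySem.List.pyRange 1 (2 * PySem.Int.floordiv (q+1) 4) 2 = [] := by
          rw [PySem.List.pyRange_of_pos _ _ (show (0:Int) < 2 by norm_num), if_neg (by omega)]
          simp
        have e4 : PySem.List.pyRange (2 * PySem.Int.floordiv (q+1) 4)
            (4 * PySem.Int.floordiv (q+1) 4 - 1) 2 = [] := by
          rw [PySem.List.pyRange_of_pos _ _ (show (0:Int) < 2 by norm_num), if_neg (by omega)]
          simp
        rw [e1, e2, e3, e4]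
        simp [PySem.Set.empty, PySem.Set.ofList]

-- ===== VERDICT (by name: the statement is the Claim_ definition above) =====
theorem get_X_q_spec : Claim_equal_get_X_q := by
  intro q xi _
  unfold Spec_get_X_q
  exact pv_main q xi
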